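-- pv_equiv track=rewrite | github.com/gilbertoamarcon/pioneer | src/laser_publisher.py | get_robots
-- ===== SOURCE A (Python) =====
-- def get_robots(sxy, hits):
-- 	robots = []
-- 	old_pos = 180
-- 	for i,s in enumerate(sxy):
-- 		size = len(s)
-- 		new_pos = (old_pos+size)%360
-- 		if size < hits and i > 0 and i < len(sxy)-1:
-- 			if old_pos > new_pos:
-- 				robots.append((old_pos,359))
-- 				robots.append((0,new_pos))
-- 			else:
-- 				robots.append((old_pos,new_pos))
-- 		old_pos = new_pos
-- 	return robots
-- ===== SOURCE B (Python) =====
-- def get_robots(sxy, hits):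
--     # Reverse-scan reformulation: only interior segments (never the first or
--     # last) can be reported, so strip them off; walk the interior BACKWARDS,
--     # deriving each segment's start angle from its end angle via
--     # start = (end - size) % 360, and build the result back-to-front.
--     n = len(sxy)
--     if n < 3:
--         return []
--     end = (180 + sum(len(s) for s in sxy[:-1])) % 360
--     robots = []
--     for s in reversed(sxy[1:-1]):
--         size = len(s)
--         start = (end - size) % 360
--         if size < hits:
--             if start > end:
--                 robots.append((0, end))
--                 robots.append((start, 359))
--             else:
--                 robots.append((start, end))
--         end = start
--     robots.reverse()
--     return robots
-- ===== Notes on version B (the rewrite author's own statement) =====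
-- stated objective: alternative
-- what changed: Replaces A's forward index-guarded accumulator loop by a reverse scan: strip the first and last segments (the index guard disappears), compute the final angle once as a closed-form sum mod 360, then walk the interior backwards deriving each start angle from the end angle by start=(end-size)%360 and building the output back-to-front.
import Mathlib
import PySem

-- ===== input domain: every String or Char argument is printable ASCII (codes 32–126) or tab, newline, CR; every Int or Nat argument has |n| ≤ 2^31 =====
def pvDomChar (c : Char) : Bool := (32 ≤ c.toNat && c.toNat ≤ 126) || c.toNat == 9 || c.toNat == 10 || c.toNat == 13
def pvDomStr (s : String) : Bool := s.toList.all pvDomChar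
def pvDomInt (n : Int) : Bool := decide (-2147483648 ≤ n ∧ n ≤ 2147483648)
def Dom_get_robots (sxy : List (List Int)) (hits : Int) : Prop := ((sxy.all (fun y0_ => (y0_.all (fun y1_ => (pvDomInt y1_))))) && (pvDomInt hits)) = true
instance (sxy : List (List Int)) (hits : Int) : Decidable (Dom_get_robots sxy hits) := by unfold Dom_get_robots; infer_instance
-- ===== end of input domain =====

-- B replaces A's forward index-guarded loop by a reverse scan over the interior
-- segments, deriving each start angle from the end angle and building the
-- output back-to-front (alternative decomposition, same cost).


-- ===== PORT A =====
-- loop body of A, named (st = (robots, old_pos), is = (i, s))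
def pvStepA (hits n : Int) (st : List (Int × Int) × Int) (is : Int × List Int) : List (Int × Int) × Int :=
  let size : Int := is.2.length
  let new_pos := PySem.Int.mod (st.2 + size) 360
  ((if size < hits ∧ is.1 > 0 ∧ is.1 < n - 1 then
      (if st.2 > new_pos then st.1 ++ [(st.2, 359), (0, new_pos)]
       else st.1 ++ [(st.2, new_pos)])
    else st.1), new_pos)

def get_robots (sxy : List (List Int)) (hits : Int) : List (Int × Int) :=
  ((PySem.List.enumerate sxy).foldl (pvStepA hits (sxy.length : Int)) ([], 180)).1

-- ===== PORT B =====
-- loop body of B, named (st = (robots, end))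
def pvStepB (hits : Int) (st : List (Int × Int) × Int) (s : List Int) : List (Int × Int) × Int :=
  let size : Int := s.length
  let start := PySem.Int.mod (st.2 - size) 360
  ((if size < hits then
      (if start > st.2 then st.1 ++ [(0, st.2), (start, 359)]
       else st.1 ++ [(start, st.2)])
    else st.1), start)

def get_robots_alt (sxy : List (List Int)) (hits : Int) : List (Int × Int) :=
  if (sxy.length : Int) < 3 then []
  else
    (((PySem.List.slice sxy (some 1) (some (-1))).reverse.foldl (pvStepB hits)
        ([], PySem.Int.mod
          (180 + ((PySem.List.slice sxy none (some (-1))).map (fun s => (s.length : Int))).sum)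
          360)).1).reverse

-- ===== PRECONDITION & SPEC =====
def Spec_get_robots (sxy : List (List Int)) (hits : Int) (out : List (Int × Int)) : Prop := out = get_robots_alt sxy hits
instance (sxy : List (List Int)) (hits : Int) (out : List (Int × Int)) : Decidable (Spec_get_robots sxy hits out) := by unfold Spec_get_robots; infer_instance

-- ===== CLAIM (what is proved, stated in full; the proofs are below) =====
def Claim_equal_get_robots : Prop := ∀ (sxy : List (List Int)) (hits : Int), Dom_get_robots sxy hits → Spec_get_robots sxy hits (get_robots sxy hits)

-- ===== LEMMAS AND PROOFS =====

-- reference: interior generator both ports are proved equal to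
def pvGen (hits : Int) : List (List Int) → Int → List (Int × Int)
  | [], _ => []
  | s :: rest, p =>
    let size : Int := s.length
    let q := PySem.Int.mod (p + size) 360
    (if size < hits then (if p > q then [(p, 359), (0, q)] else [(p, q)]) else [])
      ++ pvGen hits rest q

-- forward angular position after a run of segments
def pvEnd (p : Int) (xs : List (List Int)) : Int :=
  xs.foldl (fun p s => PySem.Int.mod (p + (s.length : Int)) 360) p

theorem pvMod_back (p s : Int) (h1 : 0 ≤ p) (h2 : p < 360) :
    PySem.Int.mod (PySem.Int.mod (p + s) 360 - s) 360 = p := by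
  rw [PySem.Int.mod_eq_emod_of_pos (by omega), PySem.Int.mod_eq_emod_of_pos (by omega)]
  rw [Int.sub_emod, Int.emod_emod_of_dvd _ dvd_rfl, ← Int.sub_emod]
  simpa using Int.emod_eq_of_lt h1 h2

theorem pvEnd_eq (xs : List (List Int)) : ∀ (a : Int),
    pvEnd (PySem.Int.mod a 360) xs =
      PySem.Int.mod (a + (xs.map (fun s => (s.length : Int))).sum) 360 := by
  induction xs with
  | nil => intro a; simp [pvEnd]
  | cons s rest ih =>
    intro a
    have hstep : PySem.Int.mod (PySem.Int.mod a 360 + (s.length : Int)) 360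
        = PySem.Int.mod (a + (s.length : Int)) 360 := by
      rw [PySem.Int.mod_eq_emod_of_pos (by omega), PySem.Int.mod_eq_emod_of_pos (by omega),
        PySem.Int.mod_eq_emod_of_pos (by omega)]
      exact Int.emod_add_emod a 360 _
    simp only [pvEnd, List.foldl_cons, List.map_cons, List.sum_cons]
    rw [show ((s.length : Int) + (rest.map (fun s => (s.length : Int))).sum)
          = ((s.length : Int) + (rest.map (fun s => (s.length : Int))).sum) from rfl]
    calc rest.foldl (fun p s => PySem.Int.mod (p + (s.length : Int)) 360)
            (PySem.Int.mod (PySem.Int.mod a 360 + (s.length : Int)) 360)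
        = pvEnd (PySem.Int.mod (a + (s.length : Int)) 360) rest := by rw [hstep]; rfl
      _ = PySem.Int.mod ((a + (s.length : Int)) + (rest.map (fun s => (s.length : Int))).sum) 360 := ih _
      _ = PySem.Int.mod (a + ((s.length : Int) + (rest.map (fun s => (s.length : Int))).sum)) 360 := by
            ring_nf

-- A-side: on a run of indices strictly inside (0, n-1) the guard is always true
theorem pvA_interior (hits n : Int) (xs : List (List Int)) : ∀ (j : Int) (acc : List (Int × Int)) (p : Int),
    1 ≤ j → j + xs.length ≤ n - 1 →
    (PySem.List.enumerate xs j).foldl (pvStepA hits n) (acc, p)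
      = (acc ++ pvGen hits xs p, pvEnd p xs) := by
  induction xs with
  | nil => intro j acc p _ _; simp [PySem.List.enumerate_nil, pvGen, pvEnd]
  | cons s rest ih =>
    intro j acc p hj hn
    rw [PySem.List.enumerate_cons]
    simp only [List.foldl_cons]
    have hguard : (0 : Int) < j ∧ j < n - 1 := by
      constructor <;> [omega; (simp only [List.length_cons] at hn; push_cast at hn; omega)]
    have hlen : (j + 1) + (rest.length : Int) ≤ n - 1 := by
      simp only [List.length_cons] at hn; push_cast at hn ⊢; omega
    rw [show pvStepA hits n (acc, p) (j, s)
        = ((if (s.length : Int) < hits then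
              (if p > PySem.Int.mod (p + (s.length : Int)) 360 then
                 acc ++ [(p, 359), (0, PySem.Int.mod (p + (s.length : Int)) 360)]
               else acc ++ [(p, PySem.Int.mod (p + (s.length : Int)) 360)])
            else acc), PySem.Int.mod (p + (s.length : Int)) 360) from by
      simp only [pvStepA]
      by_cases h : (s.length : Int) < hits
      · simp [h, hguard.1, hguard.2]
      · simp [h]]
    rw [ih (j + 1) _ _ (by omega) hlen]
    simp only [pvGen, pvEnd, List.foldl_cons]
    by_cases h : (s.length : Int) < hits
    · simp only [if_pos h]
      split_ifs <;> simp [List.append_assoc]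
    · simp [if_neg h]

-- B-side: the reverse scan rebuilds the forward intervals, reversed
theorem pvB_rev (hits : Int) (xs : List (List Int)) : ∀ (acc : List (Int × Int)) (p : Int),
    0 ≤ p → p < 360 →
    xs.reverse.foldl (pvStepB hits) (acc, pvEnd p xs)
      = (acc ++ (pvGen hits xs p).reverse, p) := by
  induction xs with
  | nil => intro acc p _ _; simp [pvEnd, pvGen]
  | cons s rest ih =>
    intro acc p hp1 hp2
    have hq1 : 0 ≤ PySem.Int.mod (p + (s.length : Int)) 360 := PySem.Int.mod_nonneg _ (by omega)
    have hq2 : PySem.Int.mod (p + (s.length : Int)) 360 < 360 := PySem.Int.mod_lt _ (by omega)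
    have hend : pvEnd p (s :: rest) = pvEnd (PySem.Int.mod (p + (s.length : Int)) 360) rest := rfl
    rw [List.reverse_cons, List.foldl_append, hend,
      ih acc (PySem.Int.mod (p + (s.length : Int)) 360) hq1 hq2]
    simp only [List.foldl_cons, List.foldl_nil, pvStepB, pvGen]
    rw [pvMod_back p (s.length : Int) hp1 hp2]
    by_cases h : (s.length : Int) < hits
    · simp only [if_pos h]
      split_ifs <;> simp [List.append_assoc]
    · simp [if_neg h]

-- ===== VERDICT (by name: the statement is the Claim_ definition above) =====
theorem get_robots_spec : Claim_equal_get_robots := by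
  intro sxy hits _
  show get_robots sxy hits = get_robots_alt sxy hits
  by_cases hsmall : (sxy.length : Int) < 3
  · -- fewer than 3 segments: both return []
    rw [get_robots_alt, if_pos hsmall]
    match sxy, hsmall with
    | [], _ => simp [get_robots, PySem.List.enumerate_nil]
    | [a], _ => simp [get_robots, PySem.List.enumerate_cons, PySem.List.enumerate_nil, pvStepA]
    | [a, b], _ =>
      simp [get_robots, PySem.List.enumerate_cons, PySem.List.enumerate_nil, pvStepA]
    | _ :: _ :: _ :: _, h => exfalso; simp only [List.length_cons] at h; push_cast at h; omega
  · -- at least 3 segments: decompose as s0 :: mid ++ [sl]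
    match sxy, hsmall with
    | s0 :: rest, hsmall =>
    obtain ⟨mid, sl, rfl⟩ : ∃ mid sl, rest = mid ++ [sl] := by
      rcases (List.eq_nil_or_concat rest) with h | ⟨mid, sl, h⟩
      · subst h; simp at hsmall
      · exact ⟨mid, sl, by simpa using h⟩
    have hp01 : 0 ≤ PySem.Int.mod (180 + (s0.length : Int)) 360 :=
      PySem.Int.mod_nonneg _ (by omega)
    have hp02 : PySem.Int.mod (180 + (s0.length : Int)) 360 < 360 :=
      PySem.Int.mod_lt _ (by omega)
    -- A side
    have hA : get_robots (s0 :: (mid ++ [sl])) hits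
        = pvGen hits mid (PySem.Int.mod (180 + (s0.length : Int)) 360) := by
      rw [get_robots, PySem.List.enumerate_cons, PySem.List.enumerate_append]
      have hlen : ((s0 :: (mid ++ [sl])).length : Int) = (mid.length : Int) + 2 := by
        simp; omega
      rw [hlen]
      simp only [List.foldl_cons, List.foldl_append, zero_add]
      have hstep0 : pvStepA hits ((mid.length : Int) + 2) ([], 180) (0, s0)
          = ([], PySem.Int.mod (180 + (s0.length : Int)) 360) := by
        simp [pvStepA]
      rw [hstep0, pvA_interior hits ((mid.length : Int) + 2) mid 1 []
        (PySem.Int.mod (180 + (s0.length : Int)) 360) (by omega) (by omega)]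
      rw [PySem.List.enumerate_cons, PySem.List.enumerate_nil]
      simp only [List.foldl_cons, List.foldl_nil]
      have hg : ¬ ((sl.length : Int) < hits ∧ (1 + (mid.length : Int)) > 0 ∧
          (1 + (mid.length : Int)) < ((mid.length : Int) + 2) - 1) := by
        rintro ⟨-, -, h⟩; omega
      simp [pvStepA, hg]
    -- B side
    have hB : get_robots_alt (s0 :: (mid ++ [sl])) hits
        = pvGen hits mid (PySem.Int.mod (180 + (s0.length : Int)) 360) := by
      rw [get_robots_alt, if_neg hsmall]
      have hsl1 : PySem.List.slice (s0 :: (mid ++ [sl])) none (some (-1)) = s0 :: mid := by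
        rw [PySem.List.slice_to_neg_one,
          show s0 :: (mid ++ [sl]) = (s0 :: mid) ++ [sl] from rfl]
        exact List.dropLast_concat
      have hsl2 : PySem.List.slice (s0 :: (mid ++ [sl])) (some 1) (some (-1)) = mid := by
        simp [PySem.List.slice]
      rw [hsl1, hsl2]
      have hendPos : PySem.Int.mod
          (180 + ((s0 :: mid).map (fun s => (s.length : Int))).sum) 360
          = pvEnd (PySem.Int.mod (180 + (s0.length : Int)) 360) mid := by
        rw [pvEnd_eq]
        simp only [List.map_cons, List.sum_cons]
        ring_nf
      rw [hendPos, pvB_rev hits mid [] _ hp01 hp02]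
      simp
    rw [hA, hB]
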